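-- pv_equiv track=rewrite | github.com/YotsuBotfds/senku-app | guide_answer_card_contracts.py | _has_unnegated_token_match
-- ===== SOURCE A (Python) =====
-- def _has_unnegated_token_match(answer_tokens: list[str], target_tokens: list[str]) -> bool:
--     if not answer_tokens or not target_tokens:
--         return False
--     last_start = len(answer_tokens) - len(target_tokens)
--     for start in range(last_start + 1):
--         if answer_tokens[start : start + len(target_tokens)] != target_tokens:
--             continue
--         if _is_negated(answer_tokens, start):
--             continue
--         return True
--     return False
--
-- def _is_negated(tokens: list[str], start: int) -> bool:
--     window = tokens[max(0, start - 5) : start]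
--     if any(token in {"not", "never", "avoid", "avoiding", "without", "no"} for token in window):
--         return True
--     if "dont" in window or "don" in window:
--         return True
--     return False
-- ===== SOURCE B (Python) =====
-- # B: precomputed prefix counts of negation tokens give an O(1) negation-window
-- # test per candidate, instead of re-slicing and scanning the 5-token window.
-- _NEGATORS = ("not", "never", "avoid", "avoiding", "without", "no", "dont", "don")
--
--
-- def _has_unnegated_token_match(answer_tokens: list[str], target_tokens: list[str]) -> bool:
--     m = len(target_tokens)
--     if m == 0 or m > len(answer_tokens):
--         return False
--     # pref[i] = number of negation tokens among answer_tokens[:i]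
--     pref = []
--     running = 0
--     for tok in answer_tokens:
--         pref.append(running)
--         running += tok in _NEGATORS
--     for start in range(len(answer_tokens) - m + 1):
--         lo = start - 5 if start >= 5 else 0
--         if pref[start] == pref[lo] and answer_tokens[start:start + m] == target_tokens:
--             return True
--     return False
-- ===== Notes on version B (the rewrite author's own statement) =====
-- stated objective: alternative
-- what changed: B precomputes a prefix-count array of negation tokens once, so each candidate's 5-token negation window is decided by one O(1) prefix-count comparison instead of re-slicing and scanning the window through two membership passes per candidate.
import Mathlib
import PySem

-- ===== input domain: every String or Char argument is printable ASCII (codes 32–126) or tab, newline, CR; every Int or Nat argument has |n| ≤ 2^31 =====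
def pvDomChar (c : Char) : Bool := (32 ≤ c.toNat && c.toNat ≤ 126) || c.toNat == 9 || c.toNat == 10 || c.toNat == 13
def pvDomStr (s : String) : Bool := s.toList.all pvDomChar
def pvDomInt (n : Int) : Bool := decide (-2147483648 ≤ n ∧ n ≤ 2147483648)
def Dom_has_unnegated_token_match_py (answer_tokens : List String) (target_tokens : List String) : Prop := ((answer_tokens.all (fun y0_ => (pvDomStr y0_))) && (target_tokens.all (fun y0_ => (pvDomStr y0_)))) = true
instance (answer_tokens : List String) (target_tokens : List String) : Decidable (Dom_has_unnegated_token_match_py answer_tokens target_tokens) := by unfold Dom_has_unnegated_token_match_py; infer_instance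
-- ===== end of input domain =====

-- B replaces the per-candidate 5-token negation-window scan by a precomputed
-- prefix-count array, making each candidate's negation test a single comparison.

-- ===== PORT A =====
def pvNeg6 : List String := ["not", "never", "avoid", "avoiding", "without", "no"]

def pvIsNegated (tokens : List String) (start : Int) : Bool :=
  let window := PySem.List.slice tokens (some (max 0 (start - 5))) (some start)
  if window.any (fun token => pvNeg6.contains token) then true
  else if window.contains "dont" || window.contains "don" then true
  else false

def pvALoop (answer_tokens target_tokens : List String) : List Int → Bool
  | [] => false
  | start :: rest =>
    if PySem.List.slice answer_tokens (some start) (some (start + (target_tokens.length : Int)))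
         ≠ target_tokens then
      pvALoop answer_tokens target_tokens rest
    else if pvIsNegated answer_tokens start then
      pvALoop answer_tokens target_tokens rest
    else true

def has_unnegated_token_match_py (answer_tokens : List String) (target_tokens : List String) : Bool :=
  if answer_tokens.isEmpty || target_tokens.isEmpty then false
  else
    pvALoop answer_tokens target_tokens
      (PySem.List.pyRange 0 (((answer_tokens.length : Int) - (target_tokens.length : Int)) + 1) 1)

-- ===== PORT B =====
def pvInNeg (t : String) : Bool :=
  ["not", "never", "avoid", "avoiding", "without", "no", "dont", "don"].contains t

-- pref[i] = number of negation tokens among answer_tokens[:i]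
def pvPref (answer_tokens : List String) : List Nat :=
  (answer_tokens.foldl
    (fun (st : List Nat × Nat) tok => (st.1 ++ [st.2], st.2 + (if pvInNeg tok then 1 else 0)))
    ([], 0)).1

def pvBLoop (answer_tokens target_tokens : List String) (pref : List Nat) : List Nat → Bool
  | [] => false
  | start :: rest =>
    let lo := if 5 ≤ start then start - 5 else 0
    -- pref[start] / pref[lo]: both indices are in range on every call, so getD is exact
    if pref.getD start 0 == pref.getD lo 0 &&
       PySem.List.slice answer_tokens (some (start : Int))
         (some ((start : Int) + (target_tokens.length : Int))) == target_tokens then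
      true
    else pvBLoop answer_tokens target_tokens pref rest

def has_unnegated_token_match_py_alt (answer_tokens : List String) (target_tokens : List String) : Bool :=
  let m := target_tokens.length
  if m == 0 || answer_tokens.length < m then false
  else
    pvBLoop answer_tokens target_tokens (pvPref answer_tokens)
      (List.range (answer_tokens.length - m + 1))

-- ===== PRECONDITION & SPEC =====
def Spec_has_unnegated_token_match_py (answer_tokens : List String) (target_tokens : List String) (out : Bool) : Prop := out = has_unnegated_token_match_py_alt answer_tokens target_tokens
instance (answer_tokens : List String) (target_tokens : List String) (out : Bool) : Decidable (Spec_has_unnegated_token_match_py answer_tokens target_tokens out) := by unfold Spec_has_unnegated_token_match_py; infer_instance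

-- ===== CLAIM (what is proved, stated in full; the proofs are below) =====
def Claim_equal_has_unnegated_token_match_py : Prop := ∀ (answer_tokens : List String) (target_tokens : List String), Dom_has_unnegated_token_match_py answer_tokens target_tokens → Spec_has_unnegated_token_match_py answer_tokens target_tokens (has_unnegated_token_match_py answer_tokens target_tokens)

-- ===== LEMMAS AND PROOFS =====

theorem pvALoop_eq_any (a t : List String) (ss : List Int) :
    pvALoop a t ss = ss.any (fun s =>
      (PySem.List.slice a (some s) (some (s + (t.length : Int))) == t) && !pvIsNegated a s) := by
  induction ss with
  | nil => rfl
  | cons s rest ih =>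
      by_cases h : PySem.List.slice a (some s) (some (s + (t.length : Int))) = t
      · by_cases hn : pvIsNegated a s = true
        · simp [pvALoop, h, hn, ih]
        · simp [pvALoop, h, hn]
      · simp [pvALoop, h, ih]

theorem pvBLoop_eq_any (a t : List String) (pref : List Nat) (ss : List Nat) :
    pvBLoop a t pref ss = ss.any (fun s =>
      (pref.getD s 0 == pref.getD (if 5 ≤ s then s - 5 else 0) 0) &&
      (PySem.List.slice a (some (s : Int)) (some ((s : Int) + (t.length : Int))) == t)) := by
  induction ss with
  | nil => rfl
  | cons s rest ih =>
      simp only [pvBLoop, List.any_cons]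
      cases h : (pref.getD s 0 == pref.getD (if 5 ≤ s then s - 5 else 0) 0 &&
          PySem.List.slice a (some (s : Int)) (some ((s : Int) + (t.length : Int))) == t) <;>
        simp [ih]

theorem pvPref_aux (l : List String) (acc : List Nat) (run : Nat) :
    (l.foldl
      (fun (st : List Nat × Nat) tok => (st.1 ++ [st.2], st.2 + (if pvInNeg tok then 1 else 0)))
      (acc, run)).1
    = acc ++ (List.range l.length).map (fun i => run + (l.take i).countP pvInNeg) := by
  induction l generalizing acc run with
  | nil => simp
  | cons tok l ih =>
      simp only [List.foldl_cons, ih, List.length_cons, List.range_succ_eq_map, List.map_cons,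
        List.map_map]
      simp only [List.take_zero, List.countP_nil, Nat.add_zero, List.append_assoc,
        List.singleton_append]
      congr 1
      congr 1
      apply List.map_congr_left
      intro i _
      simp only [Function.comp, List.take_succ_cons, List.countP_cons]
      split_ifs <;> omega

theorem pvPref_eq (a : List String) :
    pvPref a = (List.range a.length).map (fun i => (a.take i).countP pvInNeg) := by
  simpa using pvPref_aux a [] 0

theorem pvPref_getD (a : List String) (s : Nat) (hs : s < a.length) :
    (pvPref a).getD s 0 = (a.take s).countP pvInNeg := by
  rw [pvPref_eq, List.getD_eq_getElem?_getD]
  simp [List.getElem?_map, List.getElem?_range hs]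

theorem pvAny_neg_eq (w : List String) :
    (w.any (fun token => pvNeg6.contains token) || (w.contains "dont" || w.contains "don"))
      = w.any pvInNeg := by
  induction w with
  | nil => rfl
  | cons x xs ih =>
      rw [List.any_cons, List.any_cons, ← ih]
      simp [pvInNeg, pvNeg6, eq_comm,
        Bool.or_comm, Bool.or_left_comm, Bool.or_assoc]

theorem pvIfOr (c1 c2 : Bool) :
    (if c1 = true then true else if c2 = true then true else false) = (c1 || c2) := by
  cases c1 <;> cases c2 <;> rfl

theorem pvIsNegated_eq_window (a : List String) (s : Nat) :
    pvIsNegated a (s : Nat) =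
      ((a.drop (if 5 ≤ s then s - 5 else 0)).take (s - (if 5 ≤ s then s - 5 else 0))).any pvInNeg := by
  have hmax : max 0 ((s : Int) - 5) = (((if 5 ≤ s then s - 5 else 0) : Nat) : Int) := by
    split_ifs with h <;> omega
  unfold pvIsNegated
  rw [hmax, PySem.List.slice_natCast, pvIfOr, pvAny_neg_eq]

theorem pvCond_eq (a t : List String) (s : Nat) (hs : s < a.length) :
    ((PySem.List.slice a (some (s : Int)) (some ((s : Int) + (t.length : Int))) == t)
        && !pvIsNegated a (s : Nat))
      = (((pvPref a).getD s 0 == (pvPref a).getD (if 5 ≤ s then s - 5 else 0) 0) &&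
         (PySem.List.slice a (some (s : Int)) (some ((s : Int) + (t.length : Int))) == t)) := by
  set lo := if 5 ≤ s then s - 5 else 0 with hlo
  have hlos : lo ≤ s := by rw [hlo]; split_ifs <;> omega
  have hlolt : lo < a.length := lt_of_le_of_lt hlos hs
  have htake : a.take s = a.take lo ++ (a.drop lo).take (s - lo) := by
    have h : a.take s = a.take (lo + (s - lo)) := by rw [Nat.add_sub_cancel' hlos]
    rw [h, List.take_add]
  have hcount : (a.take s).countP pvInNeg
      = (a.take lo).countP pvInNeg + ((a.drop lo).take (s - lo)).countP pvInNeg := by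
    rw [htake, List.countP_append]
  have hneg : pvIsNegated a (s : Nat)
      = ((pvPref a).getD s 0 != (pvPref a).getD lo 0) := by
    rw [pvIsNegated_eq_window, pvPref_getD a s hs, pvPref_getD a lo hlolt, ← hlo]
    rw [Bool.eq_iff_iff]
    simp only [List.any_eq_true, bne_iff_ne, ne_eq, hcount]
    constructor
    · rintro ⟨x, hx, hpx⟩
      have : 0 < ((a.drop lo).take (s - lo)).countP pvInNeg :=
        List.countP_pos_iff.mpr ⟨x, hx, hpx⟩
      omega
    · intro h
      have : 0 < ((a.drop lo).take (s - lo)).countP pvInNeg := by omega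
      exact List.countP_pos_iff.mp this
  rw [hneg]
  have hbne : ((pvPref a).getD s 0 != (pvPref a).getD lo 0)
      = !((pvPref a).getD s 0 == (pvPref a).getD lo 0) := rfl
  rw [hbne]
  cases h1 : ((pvPref a).getD s 0 == (pvPref a).getD lo 0) <;>
    cases h2 : (PySem.List.slice a (some (s : Int)) (some ((s : Int) + (t.length : Int))) == t) <;>
      rfl

-- ===== VERDICT (by name: the statement is the Claim_ definition above) =====
theorem has_unnegated_token_match_py_spec : Claim_equal_has_unnegated_token_match_py := by
  intro a t _
  unfold Spec_has_unnegated_token_match_py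
  unfold has_unnegated_token_match_py has_unnegated_token_match_py_alt
  by_cases ht : t = []
  · simp [ht]
  · by_cases hlt : a.length < t.length
    · have ha : ((a.length : Int) - (t.length : Int)) + 1 ≤ 0 := by omega
      rw [PySem.List.pyRange_one_eq_nil ha]
      simp [pvALoop, hlt, List.isEmpty_iff, ht]
    · have hm0 : t.length ≠ 0 := by simpa [List.length_eq_zero_iff] using ht
      have hane : ¬ a.isEmpty := by
        simp only [List.isEmpty_iff]
        intro h
        subst h
        simp only [List.length_nil] at hlt
        omega
      rw [if_neg (by simp [hane, ht])]
      rw [if_neg (by simp [hm0, hlt])]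
      rw [pvALoop_eq_any, pvBLoop_eq_any]
      have hb : ((a.length : Int) - (t.length : Int)) + 1
          = ((a.length - t.length + 1 : Nat) : Int) := by omega
      rw [hb, PySem.List.pyRange_one]
      have : (((a.length - t.length + 1 : Nat) : Int) - 0).toNat = a.length - t.length + 1 := by
        omega
      rw [this, List.any_map]
      apply PySem.List.any_congr_mem
      intro s hsmem
      have hs : s < a.length := by
        have := List.mem_range.mp hsmem
        omega
      simp only [Function.comp, zero_add]
      exact pvCond_eq a t s hs
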